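-- pv_equiv track=rewrite | github.com/coproc/PolyPieces | examples/3pointEstimation_timing.py | fold_pairs
-- ===== SOURCE A (Python) =====
-- def fold_pairs(fl):
-- 	if len(fl) == 1: return fl[0]
-- 	fcl = []
-- 	for i in range(0,len(fl),2):
-- 		if i+1 < len(fl):
-- 			fcl.append(fl[i]^fl[i+1])
-- 		else:
-- 			fcl.append(fl[i])
-- 	return fold_pairs(fcl)
-- ===== SOURCE B (Python) =====
-- def fold_pairs(fl):
--     # XOR is associative, so the pairwise tree combination equals one linear pass.
--     acc = fl[0]
--     for x in fl[1:]:
--         acc ^= x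
--     return acc
-- ===== Notes on version B (the rewrite author's own statement) =====
-- stated objective: simpler
-- what changed: Replaces the level-by-level pairwise recursion (which builds ~log n intermediate lists) with a single linear XOR fold over the list, justified by associativity of XOR.
import Mathlib
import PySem

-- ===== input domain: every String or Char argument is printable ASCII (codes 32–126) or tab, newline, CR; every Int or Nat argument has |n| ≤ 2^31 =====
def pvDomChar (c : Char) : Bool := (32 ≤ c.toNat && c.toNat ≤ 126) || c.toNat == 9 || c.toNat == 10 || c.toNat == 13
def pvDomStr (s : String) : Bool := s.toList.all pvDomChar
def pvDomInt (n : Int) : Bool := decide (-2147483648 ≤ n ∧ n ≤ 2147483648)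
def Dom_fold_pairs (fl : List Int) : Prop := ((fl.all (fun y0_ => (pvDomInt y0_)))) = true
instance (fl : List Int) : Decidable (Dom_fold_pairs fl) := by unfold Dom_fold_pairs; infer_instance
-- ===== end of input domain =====

-- B changes A's level-by-level pairwise tree recursion into a single linear XOR fold (simpler; same result by associativity of XOR).

-- ===== PORT A =====
-- the for-loop over range(0, len(fl), 2): consumes the list two at a time;
-- the 'i+1 < len(fl)' branch is the two-element case, the else branch the lone trailing element
def pairStep : List Int → List Int
  | [] => []
  | [x] => [x]
  | x :: y :: rest => PySem.Int.bxor x y :: pairStep rest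

theorem pairStep_length_le : ∀ (l : List Int), (pairStep l).length ≤ l.length
  | [] => le_refl _
  | [_] => le_refl _
  | _ :: _ :: rest => by
      have := pairStep_length_le rest
      simp only [pairStep, List.length_cons]
      omega

def fold_pairs (fl : List Int) : Int :=
  match fl with
  | [x] => x
  | [] => 0  -- Python A recurses forever here (RecursionError); excluded by Pre_
  | x :: y :: rest => fold_pairs (pairStep (x :: y :: rest))
termination_by fl.length
decreasing_by
  have := pairStep_length_le rest
  simp [pairStep]; omega

-- ===== PORT B =====
def fold_pairs_alt (fl : List Int) : Int :=
  match fl with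
  | [] => 0  -- Source B raises IndexError here; excluded by Pre_
  | x :: xs => xs.foldl PySem.Int.bxor x

-- ===== PRECONDITION & SPEC =====
-- Pre_ excludes only the empty list, on which A raises RecursionError (infinite recursion).
def Pre_fold_pairs (fl : List Int) : Prop := fl ≠ []
instance (fl : List Int) : Decidable (Pre_fold_pairs fl) := by unfold Pre_fold_pairs; infer_instance
def pvWitness_fold_pairs : List Int := ([3, 5, 6, 7, 1])

def Spec_fold_pairs (fl : List Int) (out : Int) : Prop := out = fold_pairs_alt fl
instance (fl : List Int) (out : Int) : Decidable (Spec_fold_pairs fl out) := by unfold Spec_fold_pairs; infer_instance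

-- ===== CLAIM (what is proved, stated in full; the proofs are below) =====
def Claim_equal_fold_pairs : Prop := ∀ (fl : List Int), Dom_fold_pairs fl → Pre_fold_pairs fl → Spec_fold_pairs fl (fold_pairs fl)

-- ===== LEMMAS AND PROOFS =====

-- two's-complement encoding: dec false m = m, dec true m = -m-1
def pvDec (s : Bool) (m : Nat) : Int := if s then -(m : Int) - 1 else (m : Int)

theorem pvDec_bxor (s₁ : Bool) (m₁ : Nat) (s₂ : Bool) (m₂ : Nat) :
    PySem.Int.bxor (pvDec s₁ m₁) (pvDec s₂ m₂) = pvDec (xor s₁ s₂) (m₁ ^^^ m₂) := by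
  cases s₁ <;> cases s₂ <;>
    simp [pvDec, PySem.Int.bxor] <;> omega

theorem pvDec_surj (a : Int) : ∃ s m, a = pvDec s m := by
  by_cases h : 0 ≤ a
  · exact ⟨false, a.toNat, by simp [pvDec]; omega⟩
  · exact ⟨true, (-a - 1).toNat, by simp [pvDec]; omega⟩

theorem bxor_assoc (a b c : Int) :
    PySem.Int.bxor (PySem.Int.bxor a b) c = PySem.Int.bxor a (PySem.Int.bxor b c) := by
  obtain ⟨s₁, m₁, rfl⟩ := pvDec_surj a
  obtain ⟨s₂, m₂, rfl⟩ := pvDec_surj b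
  obtain ⟨s₃, m₃, rfl⟩ := pvDec_surj c
  simp [pvDec_bxor, Nat.xor_assoc]

theorem foldl_bxor_pairStep : ∀ (l : List Int) (a : Int),
    (pairStep l).foldl PySem.Int.bxor a = l.foldl PySem.Int.bxor a
  | [], _ => rfl
  | [_], _ => rfl
  | x :: y :: rest, a => by
      simp only [pairStep, List.foldl]
      rw [foldl_bxor_pairStep rest, bxor_assoc]

theorem fold_pairs_eq_alt : ∀ (fl : List Int), fl ≠ [] → fold_pairs fl = fold_pairs_alt fl := by
  intro fl
  induction fl using fold_pairs.induct with
  | case1 x => intro _; simp [fold_pairs, fold_pairs_alt]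
  | case2 => intro h; exact absurd rfl h
  | case3 x y rest ih =>
      intro _
      rw [fold_pairs]
      rw [ih (by simp [pairStep])]
      show fold_pairs_alt (PySem.Int.bxor x y :: pairStep rest) = _
      simp only [fold_pairs_alt, List.foldl]
      exact foldl_bxor_pairStep rest _

-- ===== VERDICT (by name: the statement is the Claim_ definition above) =====
theorem fold_pairs_spec : Claim_equal_fold_pairs := by
  intro fl _ hpre
  exact (fold_pairs_eq_alt fl hpre).symm ▸ rfl
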